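-- pv_equiv track=rewrite | github.com/segregates/retribution-src | otp/otpbase/OTPUtils.py | formatDoId
-- ===== SOURCE A (Python) =====
-- def formatDoId(doId):
--     strId = str(doId)
--     identifier = chr(65 + int(strId[:2]))
--     wordLen = 1
--
--     for i, chunk in enumerate(list(strId[2:])):
--         if wordLen % 4 == 0:
--             identifier += '-'
--
--         wordLen += 1
--         identifier += chr(65 + int(chunk) + (i * 2))
--
--     return identifier
-- ===== SOURCE B (Python) =====
-- def formatDoId(doId):
--     strId = str(doId)
--     letters = [chr(65 + int(strId[:2]))]
--     for i, chunk in enumerate(strId[2:]):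
--         letters.append(chr(65 + int(chunk) + i * 2))
--     groups = []
--     while letters:
--         groups.append(''.join(letters[:4]))
--         letters = letters[4:]
--     return '-'.join(groups)
-- ===== Notes on version B (the rewrite author's own statement) =====
-- stated objective: simpler
-- what changed: A interleaves dash insertion with letter generation using a running wordLen counter mutated inside the loop; B first builds the complete letter list, then chops it into groups of four and joins the groups with '-', eliminating the counter and the in-loop branching.
import Mathlib
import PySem

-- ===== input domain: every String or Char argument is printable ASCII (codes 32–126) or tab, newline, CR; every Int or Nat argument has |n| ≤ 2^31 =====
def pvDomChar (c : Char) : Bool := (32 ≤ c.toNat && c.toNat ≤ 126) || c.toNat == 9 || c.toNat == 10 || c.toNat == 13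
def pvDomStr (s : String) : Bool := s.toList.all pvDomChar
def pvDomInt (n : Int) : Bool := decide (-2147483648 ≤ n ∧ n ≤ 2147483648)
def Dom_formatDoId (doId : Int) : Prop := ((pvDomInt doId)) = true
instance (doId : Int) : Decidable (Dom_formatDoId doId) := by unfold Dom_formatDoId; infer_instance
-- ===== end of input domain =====

-- B replaces A's running wordLen counter and intermixed dash insertion by two separate passes:
-- first build the full letter list, then group it into chunks of four joined with '-' (simpler decomposition, same cost).

-- ===== PORT A =====
-- literal port of A: running string + wordLen counter, dash interleaved inside the loop
def formatDoId (doId : Int) : String :=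
  let strId := PySem.Int.toStr doId
  let identifier :=
    String.singleton (Char.ofNat (65 + (PySem.Int.ofStr? (PySem.Str.slice strId none (some 2))).getD 0).toNat)
  let r :=
    (PySem.List.enumerate (PySem.Str.slice strId (some 2) none).toList 0).foldl
      (fun (st : String × Int) (p : Int × Char) =>
        ((if PySem.Int.mod st.2 4 == 0 then st.1 ++ "-" else st.1) ++
           String.singleton (Char.ofNat (65 + (PySem.Int.ofStr? (String.singleton p.2)).getD 0 + p.1 * 2).toNat),
         st.2 + 1))
      (identifier, 1)
  r.1

-- ===== PORT B =====
-- Source B's while loop: chop the letter list into groups of four-letter strings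
def pvGroups : List Char → List String
  | [] => []
  | c :: rest => String.ofList (c :: rest.take 3) :: pvGroups (rest.drop 3)
  termination_by ls => ls.length
  decreasing_by simp; try omega

def formatDoId_alt (doId : Int) : String :=
  let strId := PySem.Int.toStr doId
  let letters :=
    Char.ofNat (65 + (PySem.Int.ofStr? (PySem.Str.slice strId none (some 2))).getD 0).toNat ::
      (PySem.List.enumerate (PySem.Str.slice strId (some 2) none).toList 0).map
        (fun p => Char.ofNat (65 + (PySem.Int.ofStr? (String.singleton p.2)).getD 0 + p.1 * 2).toNat)
  PySem.Str.join "-" (pvGroups letters)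

-- ===== PRECONDITION & SPEC =====
def Spec_formatDoId (doId : Int) (out : String) : Prop := out = formatDoId_alt doId
instance (doId : Int) (out : String) : Decidable (Spec_formatDoId doId out) := by unfold Spec_formatDoId; infer_instance

-- ===== CLAIM (what is proved, stated in full; the proofs are below) =====
def Claim_equal_formatDoId : Prop := ∀ (doId : Int), Dom_formatDoId doId → Spec_formatDoId doId (formatDoId doId)

-- ===== LEMMAS AND PROOFS =====

-- chars-level mirror of pvGroups
def pvGroupsL : List Char → List (List Char)
  | [] => []
  | c :: rest => (c :: rest.take 3) :: pvGroupsL (rest.drop 3)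
  termination_by ls => ls.length
  decreasing_by simp; try omega

lemma pvGroups_toList (ls : List Char) : (pvGroups ls).map String.toList = pvGroupsL ls := by
  match ls with
  | [] => simp [pvGroups, pvGroupsL]
  | c :: rest =>
    simp only [pvGroups, pvGroupsL, List.map_cons, String.toList_ofList]
    rw [pvGroups_toList (rest.drop 3)]
  termination_by ls.length
  decreasing_by simp; try omega

-- the tail of A's output (everything after the first letter), as a function of the
-- remaining letters and the current wordLen
def restL : Int → List Char → List Char
  | _, [] => []
  | w, c :: cs => ((if PySem.Int.mod w 4 == 0 then ['-'] else []) ++ [c]) ++ restL (w + 1) cs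

lemma restL_mod (cs : List Char) : ∀ w : Int, restL (w + 4) cs = restL w cs := by
  induction cs with
  | nil => intro w; rfl
  | cons c cs ih =>
    intro w
    have hmod : PySem.Int.mod (w + 4) 4 = PySem.Int.mod w 4 := by
      rw [PySem.Int.mod_eq_emod_of_pos (by norm_num), PySem.Int.mod_eq_emod_of_pos (by norm_num)]
      omega
    have h1 : w + 4 + 1 = (w + 1) + 4 := by omega
    rw [restL, restL, hmod, h1, ih (w + 1)]

-- A's loop, characterised: fold over enumerated pairs = initial string ++ restL
lemma foldA (g : Int × Char → Char) (ps : List (Int × Char)) :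
    ∀ (id : String) (w : Int),
      ((ps.foldl
          (fun (st : String × Int) (p : Int × Char) =>
            ((if PySem.Int.mod st.2 4 == 0 then st.1 ++ "-" else st.1) ++ String.singleton (g p),
             st.2 + 1))
          (id, w)).1).toList = id.toList ++ restL w (ps.map g) := by
  induction ps with
  | nil => intro id w; simp [restL]
  | cons p ps ih =>
    intro id w
    rw [List.foldl_cons, ih, List.map_cons, restL]
    by_cases h : (4:Int) ∣ w <;>
      simp [h, List.append_assoc]

-- B's grouping, characterised: join of the 4-groups of (c :: ms) = c :: restL 1 ms
lemma keyB (c : Char) (ms : List Char) :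
    PySem.Chars.join ['-'] (pvGroupsL (c :: ms)) = c :: restL 1 ms := by
  match ms with
  | [] =>
    simp [pvGroupsL, restL, PySem.Chars.join_singleton]
  | [a] =>
    simp [pvGroupsL, restL, PySem.Chars.join_singleton, PySem.Int.mod]
  | [a, b] =>
    simp [pvGroupsL, restL, PySem.Chars.join_singleton, PySem.Int.mod]
  | [a, b, d] =>
    simp [pvGroupsL, restL, PySem.Chars.join_singleton, PySem.Int.mod]
  | a :: b :: d :: e :: tl =>
    have ih := keyB e tl
    have hg : pvGroupsL (c :: a :: b :: d :: e :: tl)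
        = [c, a, b, d] :: (e :: tl.take 3) :: pvGroupsL (tl.drop 3) := by
      simp [pvGroupsL]
    rw [hg, PySem.Chars.join_cons_cons]
    have hg2 : (e :: tl.take 3) :: pvGroupsL (tl.drop 3) = pvGroupsL (e :: tl) := by
      simp [pvGroupsL]
    rw [hg2, ih]
    have h5 : restL 1 (a :: b :: d :: e :: tl)
        = a :: b :: d :: '-' :: e :: restL 1 tl := by
      rw [restL, restL, restL, restL]
      have : (1:Int) + 1 + 1 + 1 + 1 = 1 + 4 := by omega
      rw [this, restL_mod]
      simp [PySem.Int.mod]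
    rw [h5]
    simp
  termination_by ms.length
  decreasing_by simp; try omega

-- ===== VERDICT (by name: the statement is the Claim_ definition above) =====
theorem formatDoId_spec : Claim_equal_formatDoId := by
  intro doId _
  unfold Spec_formatDoId formatDoId formatDoId_alt
  apply String.toList_inj.mp
  simp only []
  rw [foldA]
  have hjoin : ∀ parts, (PySem.Str.join "-" parts).toList
      = PySem.Chars.join ['-'] (parts.map String.toList) := by
    intro parts; simp [PySem.Str.join]
  rw [hjoin, pvGroups_toList, keyB]
  simp
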